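-- pv_equiv track=rewrite | github.com/Anteru/sjson | sjson/__init__.py | _escape_string
-- ===== SOURCE A (Python) =====
-- import string
-- import typing
--
-- _IDENTIFIER_SET = frozenset(string.ascii_letters + string.digits + '_')
--
-- _ESCAPE_CHARACTER_SET = {'\n': '\\n', '\b': '\\b', '\t': '\\t', '"': '\\"'}
--
-- def _escape_string(obj: str, quote=True) -> typing.Generator[str, None, None]:
--     """Escape a string.
--
--     If quote is set, the string will be returned with quotation marks at the
--     beginning and end. If quote is set to false, quotation marks will be only
--     added if needed(that is, if the string is not an identifier.)"""
--     if any([c not in _IDENTIFIER_SET for c in obj]):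
--         # String must be quoted, even if quote was not requested
--         quote = True
--
--     if quote:
--         yield '"'
--
--     for key, value in _ESCAPE_CHARACTER_SET.items():
--         obj = obj.replace(key, value)
--
--     yield obj
--
--     if quote:
--         yield '"'
-- ===== SOURCE B (Python) =====
-- import string
-- import typing
--
-- _IDENTIFIER_SET = frozenset(string.ascii_letters + string.digits + '_')
--
-- _ESCAPE_CHARACTER_SET = {'\n': '\\n', '\b': '\\b', '\t': '\\t', '"': '\\"'}
--
-- def _escape_string(obj: str, quote=True) -> typing.Generator[str, None, None]:
--     needs_quote = quote or not all(c in _IDENTIFIER_SET for c in obj)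
--     escaped = ''.join(_ESCAPE_CHARACTER_SET.get(c, c) for c in obj)
--     if needs_quote:
--         yield '"'
--     yield escaped
--     if needs_quote:
--         yield '"'
-- ===== Notes on version B (the rewrite author's own statement) =====
-- stated objective: simpler
-- what changed: B builds the escaped body in one character-by-character pass with a per-character dict lookup, instead of A's four separate full-string str.replace scans plus a list-materialising any() scan, and decides quoting up front with a short-circuiting all().
import Mathlib
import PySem

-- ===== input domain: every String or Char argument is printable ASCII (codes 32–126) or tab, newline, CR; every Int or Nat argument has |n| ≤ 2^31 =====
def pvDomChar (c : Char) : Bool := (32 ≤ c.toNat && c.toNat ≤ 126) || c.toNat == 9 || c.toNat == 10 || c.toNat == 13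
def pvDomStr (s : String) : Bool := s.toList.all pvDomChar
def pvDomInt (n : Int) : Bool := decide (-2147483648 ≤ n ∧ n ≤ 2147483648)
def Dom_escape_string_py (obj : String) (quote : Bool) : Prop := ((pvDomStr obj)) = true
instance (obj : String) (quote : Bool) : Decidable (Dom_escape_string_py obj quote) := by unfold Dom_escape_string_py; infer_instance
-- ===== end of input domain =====

-- B replaces A's four full-string str.replace scans with one per-character lookup pass
-- and decides quoting with a short-circuiting all() (objective: simpler single-pass).


-- ===== PORT A =====
-- _IDENTIFIER_SET = frozenset(ascii_letters + digits + '_'); only membership is used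
def pvIdChars : List Char :=
  "abcdefghijklmnopqrstuvwxyzABCDEFGHIJKLMNOPQRSTUVWXYZ0123456789_".toList

-- _ESCAPE_CHARACTER_SET items, in dict insertion order
def pvEscItems : List (String × String) :=
  [("\n", "\\n"), ("\x08", "\\b"), ("\t", "\\t"), ("\"", "\\\"")]

def escape_string_py (obj : String) (quote : Bool) : List String :=
  -- if any([c not in _IDENTIFIER_SET for c in obj]): quote = True
  let quote :=
    if (obj.toList.map (fun c => !(pvIdChars.contains c))).any (fun b => b) then true else quote
  -- for key, value in _ESCAPE_CHARACTER_SET.items(): obj = obj.replace(key, value)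
  let obj := pvEscItems.foldl (fun o kv => PySem.Str.replace o kv.1 kv.2) obj
  (if quote then ["\""] else []) ++ [obj] ++ (if quote then ["\""] else [])

-- ===== PORT B =====
-- _ESCAPE_CHARACTER_SET.get(c, c), per character (as a list of chars)
def pvEscChar (c : Char) : List Char :=
  if c = '\n' then ['\\', 'n']
  else if c = '\x08' then ['\\', 'b']
  else if c = '\t' then ['\\', 't']
  else if c = '"' then ['\\', '"']
  else [c]

def escape_string_py_alt (obj : String) (quote : Bool) : List String :=
  let needsQuote := quote || !(obj.toList.all (fun c => pvIdChars.contains c))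
  let escaped := String.ofList (obj.toList.flatMap pvEscChar)
  (if needsQuote then ["\""] else []) ++ [escaped] ++ (if needsQuote then ["\""] else [])

-- ===== PRECONDITION & SPEC =====
def Spec_escape_string_py (obj : String) (quote : Bool) (out : List String) : Prop := out = escape_string_py_alt obj quote
instance (obj : String) (quote : Bool) (out : List String) : Decidable (Spec_escape_string_py obj quote out) := by unfold Spec_escape_string_py; infer_instance

-- ===== CLAIM (what is proved, stated in full; the proofs are below) =====
def Claim_equal_escape_string_py : Prop := ∀ (obj : String) (quote : Bool), Dom_escape_string_py obj quote → Spec_escape_string_py obj quote (escape_string_py obj quote)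

-- ===== LEMMAS AND PROOFS =====

-- Chars.replace with a single-character pattern is a flatMap.
theorem replace_go_single (k : Char) (new : List Char) :
    ∀ (s acc : List Char) (fuel : Nat), s.length ≤ fuel →
      PySem.Chars.replace.go [k] new fuel s acc
        = acc.reverse ++ s.flatMap (fun c => if c = k then new else [c]) := by
  intro s
  induction s with
  | nil =>
    intro acc fuel _
    cases fuel <;> simp [PySem.Chars.replace.go]
  | cons c t ih =>
    intro acc fuel hf
    cases fuel with
    | zero => simp at hf
    | succ m =>
      simp only [PySem.Chars.replace.go]
      by_cases hc : c = k
      · subst hc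
        have hp : [c].isPrefixOf (c :: t) = true := by simp [List.isPrefixOf]
        rw [if_pos hp]
        simp only [List.length_cons, List.drop_succ_cons, List.length_nil, List.drop_zero]
        simp only [List.length_cons] at hf
        rw [ih (new.reverse ++ acc) m (by omega)]
        simp
      · have hp : [k].isPrefixOf (c :: t) = false := by
          simp [List.isPrefixOf]
          intro h; exact absurd h.symm hc
        rw [if_neg (by simp [hp])]
        simp only [List.length_cons] at hf
        rw [ih (c :: acc) m (by omega)]
        simp [hc]

theorem replace_single (k : Char) (new s : List Char) :
    PySem.Chars.replace s [k] new = s.flatMap (fun c => if c = k then new else [c]) := by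
  rw [PySem.Chars.replace]
  simp only [List.isEmpty_cons, Bool.false_eq_true, if_false]
  simpa using replace_go_single k new s [] s.length le_rfl

-- the four sequential single-character replaces collapse, per character, to pvEscChar
theorem four_replaces_eq_flatMap (l : List Char) :
    ((((l.flatMap (fun c => if c = '\n' then ['\\','n'] else [c])).flatMap
        (fun c => if c = '\x08' then ['\\','b'] else [c])).flatMap
        (fun c => if c = '\t' then ['\\','t'] else [c])).flatMap
        (fun c => if c = '"' then ['\\','"'] else [c]))
      = l.flatMap pvEscChar := by
  simp only [List.flatMap_assoc]
  refine List.flatMap_congr (fun c _ => ?_)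
  by_cases h1 : c = '\n'
  · subst h1; decide
  · by_cases h2 : c = '\x08'
    · subst h2; decide
    · by_cases h3 : c = '\t'
      · subst h3; decide
      · by_cases h4 : c = '"'
        · subst h4; decide
        · simp [h1, h2, h3, h4, pvEscChar]

theorem escaped_eq (obj : String) :
    pvEscItems.foldl (fun o kv => PySem.Str.replace o kv.1 kv.2) obj
      = String.ofList (obj.toList.flatMap pvEscChar) := by
  simp only [pvEscItems, List.foldl_cons, List.foldl_nil]
  have h : ∀ (s : String) (k : Char) (v : List Char),
      PySem.Str.replace s (String.ofList [k]) (String.ofList v)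
        = String.ofList (s.toList.flatMap (fun c => if c = k then v else [c])) := by
    intro s k v
    rw [PySem.Str.replace]
    congr 1
    simpa using replace_single k v s.toList
  have e1 : ("\n" : String) = String.ofList ['\n'] := rfl
  have e2 : ("\x08" : String) = String.ofList ['\x08'] := rfl
  have e3 : ("\t" : String) = String.ofList ['\t'] := rfl
  have e4 : ("\"" : String) = String.ofList ['"'] := rfl
  have ev1 : ("\\n" : String) = String.ofList ['\\','n'] := rfl
  have ev2 : ("\\b" : String) = String.ofList ['\\','b'] := rfl
  have ev3 : ("\\t" : String) = String.ofList ['\\','t'] := rfl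
  have ev4 : ("\\\"" : String) = String.ofList ['\\','"'] := rfl
  rw [e1, ev1, e2, ev2, e3, ev3, e4, ev4]
  simp only [h, String.toList_ofList]
  congr 1
  exact four_replaces_eq_flatMap obj.toList

theorem any_not_eq (l : List Char) :
    (l.any fun c => !(pvIdChars.contains c)) = !(l.all fun c => pvIdChars.contains c) := by
  induction l with
  | nil => rfl
  | cons c t ih => simp only [List.any_cons, List.all_cons, ih, Bool.not_and]

theorem quote_eq (obj : String) (quote : Bool) :
    (if (obj.toList.map (fun c => !(pvIdChars.contains c))).any (fun b => b) then true else quote)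
      = (quote || !(obj.toList.all (fun c => pvIdChars.contains c))) := by
  rw [List.any_map]
  have : ((fun b => b) ∘ fun c => !(pvIdChars.contains c)) = fun c => !(pvIdChars.contains c) := rfl
  rw [this, any_not_eq]
  cases hall : (obj.toList.all fun c => pvIdChars.contains c) <;> cases quote <;> rfl

-- ===== VERDICT (by name: the statement is the Claim_ definition above) =====
theorem escape_string_py_spec : Claim_equal_escape_string_py := by
  intro obj quote _
  unfold Spec_escape_string_py escape_string_py escape_string_py_alt
  rw [quote_eq, escaped_eq]
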